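-- pv_equiv track=rewrite | github.com/PStamelias/Undergraduate_Thesis | Part2/Front-End/page_run.py | return_creator
-- ===== SOURCE A (Python) =====
-- def return_creator(str):
--     coun=0
--     my_str=""
--     for i in range(0,len(str)):
--         if str[i]==',':
--             coun=coun+1
--             continue
--         if coun==2:
--             my_str=my_str+str[i]
--     return my_str
-- ===== SOURCE B (Python) =====
-- def return_creator(str):
--     parts = str.split(',')
--     return parts[2] if len(parts) > 2 else ""
-- ===== Notes on version B (the rewrite author's own statement) =====
-- stated objective: simpler
-- what changed: Replaces the per-character counter-and-accumulate loop with a partition-then-select: split the string on the comma separator once and return the third field, or the empty string when fewer than three fields exist.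
import Mathlib
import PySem

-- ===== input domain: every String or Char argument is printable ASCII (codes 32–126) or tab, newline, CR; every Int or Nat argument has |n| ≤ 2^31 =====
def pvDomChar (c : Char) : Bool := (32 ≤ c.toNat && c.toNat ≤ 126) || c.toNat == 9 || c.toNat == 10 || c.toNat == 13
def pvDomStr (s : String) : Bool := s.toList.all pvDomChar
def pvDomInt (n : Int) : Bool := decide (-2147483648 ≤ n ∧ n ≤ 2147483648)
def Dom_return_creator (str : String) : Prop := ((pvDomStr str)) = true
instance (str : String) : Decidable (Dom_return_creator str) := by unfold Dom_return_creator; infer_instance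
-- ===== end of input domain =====

-- B splits the string on ',' once and selects the third field; simpler than A's counter loop.

-- ===== PORT A =====
-- one loop step of A's body: comma increments the counter, otherwise append when coun == 2
def pvStepA (st : Int × List Char) (c : Char) : Int × List Char :=
  if c = ',' then (st.1 + 1, st.2)
  else if st.1 = 2 then (st.1, st.2 ++ [c]) else st

def return_creator (str : String) : String :=
  String.ofList
    (((PySem.List.pyRange 0 (str.toList.length : Int) 1).foldl
        (fun st i => pvStepA st (PySem.List.pyGetD str.toList i ' '))
        ((0 : Int), ([] : List Char))).2)

-- ===== PORT B =====
def return_creator_alt (str : String) : String :=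
  let parts := PySem.Chars.splitOn str.toList [',']
  if 2 < parts.length then String.ofList (parts.getD 2 []) else ""

-- ===== PRECONDITION & SPEC =====
def Spec_return_creator (str : String) (out : String) : Prop := out = return_creator_alt str
instance (str : String) (out : String) : Decidable (Spec_return_creator str out) := by unfold Spec_return_creator; infer_instance

-- ===== CLAIM (what is proved, stated in full; the proofs are below) =====
def Claim_equal_return_creator : Prop := ∀ (str : String), Dom_return_creator str → Spec_return_creator str (return_creator str)

-- ===== LEMMAS AND PROOFS =====

-- the comma-separated fields of a character list, structurally
def pvFields : List Char → List (List Char)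
  | [] => [[]]
  | c :: rest =>
    if c = ',' then [] :: pvFields rest
    else match pvFields rest with
      | [] => [[c]]
      | x :: xs => (c :: x) :: xs

theorem pvFields_ne_nil (l : List Char) : pvFields l ≠ [] := by
  cases l with
  | nil => simp [pvFields]
  | cons c rest =>
    simp only [pvFields]
    split
    · simp
    · split <;> simp

theorem pvFields_comma (rest : List Char) : pvFields (',' :: rest) = [] :: pvFields rest := by
  simp [pvFields]

theorem pvFields_char (c : Char) (rest : List Char) (hc : c ≠ ',') :
    ∃ x xs, pvFields rest = x :: xs ∧ pvFields (c :: rest) = (c :: x) :: xs := by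
  cases hf : pvFields rest with
  | nil => exact absurd hf (pvFields_ne_nil rest)
  | cons x xs =>
    refine ⟨x, xs, rfl, ?_⟩
    simp [pvFields, hc, hf]

theorem pvGo_eq (fuel : Nat) (l cur : List Char) (acc : List (List Char)) (h : l.length < fuel) :
    PySem.Chars.splitOn.go [','] fuel l cur acc =
      acc.reverse ++ (match pvFields l with
        | [] => [cur.reverse]
        | x :: xs => (cur.reverse ++ x) :: xs) := by
  induction fuel generalizing l cur acc with
  | zero => omega
  | succ f ih =>
    cases l with
    | nil =>
      simp [PySem.Chars.splitOn.go, pvFields]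
    | cons c rest =>
      by_cases hc : c = ','
      · subst hc
        rw [show PySem.Chars.splitOn.go [','] (f+1) (',' :: rest) cur acc
              = PySem.Chars.splitOn.go [','] f rest [] (cur.reverse :: acc) from by
          simp [PySem.Chars.splitOn.go, List.isPrefixOf]]
        rw [ih rest [] (cur.reverse :: acc) (by simpa using Nat.lt_of_succ_lt_succ h)]
        rw [pvFields_comma]
        cases hf : pvFields rest with
        | nil => exact absurd hf (pvFields_ne_nil rest)
        | cons x xs => simp
      · rw [show PySem.Chars.splitOn.go [','] (f+1) (c :: rest) cur acc
              = PySem.Chars.splitOn.go [','] f rest (c :: cur) acc from by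
          simp [PySem.Chars.splitOn.go, List.isPrefixOf]
          intro h
          exact absurd h.symm hc]
        rw [ih rest (c :: cur) acc (by simpa using Nat.lt_of_succ_lt_succ h)]
        obtain ⟨x, xs, hf, hf'⟩ := pvFields_char c rest hc
        rw [hf, hf']
        simp

theorem pvSplitOn_eq (l : List Char) : PySem.Chars.splitOn l [','] = pvFields l := by
  unfold PySem.Chars.splitOn
  rw [pvGo_eq (l.length + 1) l [] [] (by omega)]
  cases hf : pvFields l with
  | nil => exact absurd hf (pvFields_ne_nil l)
  | cons x xs => simp

-- what A's loop contributes from state coun over the remaining characters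
def pvPick (coun : Int) (l : List Char) : List Char :=
  if coun ≤ 2 then (pvFields l).getD (2 - coun).toNat [] else []

theorem pvFoldA (l : List Char) (coun : Int) (acc : List Char) (h : 0 ≤ coun) :
    (l.foldl pvStepA (coun, acc)).2 = acc ++ pvPick coun l := by
  induction l generalizing coun acc with
  | nil =>
    simp only [List.foldl_nil, pvPick, pvFields]
    by_cases h2 : coun ≤ 2
    · rw [if_pos h2]
      by_cases he : coun = 2
      · subst he; simp
      · rw [List.getD_eq_default _ _ (by simp; omega)]
        simp
    · simp [h2]
  | cons c rest ih =>
    by_cases hc : c = ','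
    · subst hc
      rw [List.foldl_cons, show pvStepA (coun, acc) ',' = (coun + 1, acc) from by
        simp [pvStepA]]
      rw [ih (coun + 1) acc (by omega)]
      congr 1
      simp only [pvPick, pvFields_comma]
      by_cases h2 : coun ≤ 2
      · rw [if_pos h2]
        by_cases he : coun = 2
        · subst he
          rw [if_neg (by omega : ¬ (2:Int) + 1 ≤ 2),
              show ((2:Int) - 2).toNat = 0 from rfl]
          rfl
        · have h1 : (2 - coun).toNat = (2 - (coun + 1)).toNat + 1 := by omega
          rw [if_pos (by omega : coun + 1 ≤ 2), h1, List.getD_cons_succ]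
      · rw [if_neg h2, if_neg (by omega : ¬ coun + 1 ≤ 2)]
    · by_cases he : coun = 2
      · subst he
        rw [List.foldl_cons, show pvStepA (2, acc) c = (2, acc ++ [c]) from by
          simp [pvStepA, hc]]
        rw [ih 2 (acc ++ [c]) (by omega)]
        obtain ⟨x, xs, hf, hf'⟩ := pvFields_char c rest hc
        simp [pvPick, hf, hf']
      · rw [List.foldl_cons, show pvStepA (coun, acc) c = (coun, acc) from by
          simp [pvStepA, hc, he]]
        rw [ih coun acc h]
        congr 1
        obtain ⟨x, xs, hf, hf'⟩ := pvFields_char c rest hc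
        simp only [pvPick, hf, hf']
        by_cases h2 : coun ≤ 2
        · rw [if_pos h2, if_pos h2]
          obtain ⟨k, hk'⟩ : ∃ k, (2 - coun).toNat = k + 1 :=
            ⟨(2 - coun).toNat - 1, by omega⟩
          simp [hk']
        · simp [h2]

-- ===== VERDICT (by name: the statement is the Claim_ definition above) =====
theorem return_creator_spec : Claim_equal_return_creator := by
  intro s _
  show String.ofList
      (((PySem.List.pyRange 0 (s.toList.length : Int) 1).foldl
          (fun st i => pvStepA st (PySem.List.pyGetD s.toList i ' '))
          ((0 : Int), ([] : List Char))).2)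
    = (if 2 < (PySem.Chars.splitOn s.toList [',']).length
       then String.ofList ((PySem.Chars.splitOn s.toList [',']).getD 2 []) else "")
  rw [PySem.List.foldl_pyRange_zero_pyGetD' s.toList ' ' pvStepA ((0 : Int), ([] : List Char))]
  rw [pvFoldA s.toList 0 [] (by omega), pvSplitOn_eq]
  simp only [List.nil_append, pvPick, if_pos (by omega : (0:Int) ≤ 2)]
  by_cases h2 : 2 < (pvFields s.toList).length
  · rw [if_pos h2]
    rfl
  · rw [if_neg h2]
    rw [List.getD_eq_default _ _ (by omega)]
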